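-- pv_equiv track=rewrite | github.com/ys03055/CodingTestExercise | 모의고사_완전탐색.py | solution
-- ===== SOURCE A (Python) =====
-- def solution(answers):
--     person1 = [1, 2, 3, 4, 5]*2000
--     person2 = [2, 1, 2, 3, 2, 4, 2, 5]*1250
--     person3 = [3, 3, 1, 1, 2, 2, 4, 4, 5, 5]*1000
--     person1_cnt = 0
--     person2_cnt = 0
--     person3_cnt = 0
--     answer = []
--     max_cnt = []
--
--     for i in range(len(answers)):
--         if answers[i] == person1[i] :
--             person1_cnt += 1
--         if answers[i] == person2[i] :
--             person2_cnt += 1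
--         if answers[i] == person3[i] :
--             person3_cnt += 1
--
--     max_cnt.append(person1_cnt)
--     max_cnt.append(person2_cnt)
--     max_cnt.append(person3_cnt)
--
--     if max(max_cnt) == person1_cnt :
--         answer.append(1)
--     if max(max_cnt) == person2_cnt :
--         answer.append(2)
--     if max(max_cnt) == person3_cnt :
--         answer.append(3)
--
--     return answer
-- ===== SOURCE B (Python) =====
-- def solution(answers):
--     # One pass builds a histogram keyed by (index mod 40, value); 40 = lcm(5, 8, 10),
--     # the common period of the three students' cyclic patterns.  Each score is then
--     # read off the 40-slot table without touching the answers again.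
--     hist = {}
--     for i, a in enumerate(answers):
--         key = (i % 40, a)
--         hist[key] = hist.get(key, 0) + 1
--     patterns = [[1, 2, 3, 4, 5],
--                 [2, 1, 2, 3, 2, 4, 2, 5],
--                 [3, 3, 1, 1, 2, 2, 4, 4, 5, 5]]
--     scores = [sum(hist.get((r, pat[r % len(pat)]), 0) for r in range(40))
--               for pat in patterns]
--     m = max(scores)
--     return [k + 1 for k, s in enumerate(scores) if s == m]
-- ===== Notes on version B (the rewrite author's own statement) =====
-- stated objective: alternative
-- what changed: A walks the answers once with three parallel counters against three pre-tiled 10000-entry pattern lists; B instead builds a histogram keyed by (index mod 40, value) in one pass (40 = lcm of the pattern periods) and then computes each student's score purely from the 40-slot table, never re-reading the answers, before selecting argmax indices.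
import Mathlib
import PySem

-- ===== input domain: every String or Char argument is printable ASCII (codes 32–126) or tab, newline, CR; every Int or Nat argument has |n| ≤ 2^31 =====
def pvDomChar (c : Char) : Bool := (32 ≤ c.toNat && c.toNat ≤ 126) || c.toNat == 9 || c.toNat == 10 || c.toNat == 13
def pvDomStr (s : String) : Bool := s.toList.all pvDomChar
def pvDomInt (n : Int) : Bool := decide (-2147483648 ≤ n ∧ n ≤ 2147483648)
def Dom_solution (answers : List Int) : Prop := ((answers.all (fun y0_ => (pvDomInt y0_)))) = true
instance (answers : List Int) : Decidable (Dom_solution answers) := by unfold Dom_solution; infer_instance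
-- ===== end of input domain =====

-- B replaces A's single pass with three hard-wired counters over pre-tiled tables by a
-- one-pass histogram keyed by (index mod 40, value) from which all three scores are read
-- (alternative decomposition; return value only).


-- ===== PORT A =====
def solution (answers : List Int) : List Int :=
  let person1 : List Int := (List.replicate 2000 ([1, 2, 3, 4, 5] : List Int)).flatten
  let person2 : List Int := (List.replicate 1250 ([2, 1, 2, 3, 2, 4, 2, 5] : List Int)).flatten
  let person3 : List Int := (List.replicate 1000 ([3, 3, 1, 1, 2, 2, 4, 4, 5, 5] : List Int)).flatten
  let c :=
    (PySem.List.pyRange 0 (answers.length : Int)).foldl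
      (fun (c : Int × Int × Int) i =>
        (if PySem.List.pyGetD answers i 0 = PySem.List.pyGetD person1 i 0 then c.1 + 1 else c.1,
         if PySem.List.pyGetD answers i 0 = PySem.List.pyGetD person2 i 0 then c.2.1 + 1 else c.2.1,
         if PySem.List.pyGetD answers i 0 = PySem.List.pyGetD person3 i 0 then c.2.2 + 1 else c.2.2))
      (0, 0, 0)
  let maxCnt : List Int := [c.1, c.2.1, c.2.2]
  let m : Int := (PySem.List.max? maxCnt (fun x => x)).getD 0
  let answer : List Int := []
  let answer := if m = c.1 then answer ++ [1] else answer
  let answer := if m = c.2.1 then answer ++ [2] else answer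
  let answer := if m = c.2.2 then answer ++ [3] else answer
  answer

-- ===== PORT B =====
def solution_alt (answers : List Int) : List Int :=
  let hist : PySem.Dict (Int × Int) Int :=
    (PySem.List.enumerate answers).foldl
      (fun d p =>
        d.insert (PySem.Int.mod p.1 40, p.2) (d.getD (PySem.Int.mod p.1 40, p.2) 0 + 1))
      PySem.Dict.empty
  let patterns : List (List Int) :=
    [[1, 2, 3, 4, 5], [2, 1, 2, 3, 2, 4, 2, 5], [3, 3, 1, 1, 2, 2, 4, 4, 5, 5]]
  let scores : List Int := patterns.map (fun pat =>
    ((PySem.List.pyRange 0 40 1).map (fun r =>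
      hist.getD (r, PySem.List.pyGetD pat (PySem.Int.mod r (pat.length : Int)) 0) 0)).sum)
  let m : Int := (PySem.List.max? scores (fun x => x)).getD 0
  (PySem.List.enumerate scores).filterMap (fun p => if p.2 = m then some (p.1 + 1) else none)

-- ===== PRECONDITION & SPEC =====
-- Pre_ excludes lists longer than 10000, on which A raises IndexError (its fixed pattern
-- tables have 10000 entries); B returns normally there.
def Pre_solution (answers : List Int) : Prop := answers.length ≤ 10000
instance (answers : List Int) : Decidable (Pre_solution answers) := by unfold Pre_solution; infer_instance
def pvWitness_solution : List Int := [1, 3, 2, 4, 2]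

def Spec_solution (answers : List Int) (out : List Int) : Prop := out = solution_alt answers
instance (answers : List Int) (out : List Int) : Decidable (Spec_solution answers out) := by unfold Spec_solution; infer_instance

-- ===== CLAIM (what is proved, stated in full; the proofs are below) =====
def Claim_equal_solution : Prop := ∀ (answers : List Int), Dom_solution answers → Pre_solution answers → Spec_solution answers (solution answers)

-- ===== LEMMAS AND PROOFS =====

-- flatten of a replicated pattern is cyclic
theorem cyc_getD (pat : List Int) (m i : Nat) (d : Int) (h : i < m * pat.length) :
    ((List.replicate m pat).flatten).getD i d = pat.getD (i % pat.length) d := by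
  induction m generalizing i with
  | zero => simp at h
  | succ n ih =>
      have hlen : 0 < pat.length := by
        by_contra hl
        have : pat.length = 0 := by omega
        simp [this] at h
      rw [List.replicate_succ, List.flatten_cons]
      by_cases hi : i < pat.length
      · rw [List.getD_eq_getElem?_getD, List.getElem?_append_left hi,
          Nat.mod_eq_of_lt hi, ← List.getD_eq_getElem?_getD]
      · have hle : pat.length ≤ i := by omega
        rw [List.getD_eq_getElem?_getD, List.getElem?_append_right hle,
          ← List.getD_eq_getElem?_getD, ih (i - pat.length) (by
            have hmul : (n + 1) * pat.length = n * pat.length + pat.length := by ring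
            omega), Nat.mod_eq_sub_mod hle]

-- A's three-counter loop over range(len) computes three countP's over List.range
theorem triple_foldl (f1 f2 f3 : Int → Prop) [DecidablePred f1] [DecidablePred f2]
    [DecidablePred f3] (n : Nat) (c : Int × Int × Int) :
    (PySem.List.pyRange 0 (n : Int)).foldl
      (fun (c : Int × Int × Int) i =>
        (if f1 i then c.1 + 1 else c.1,
         if f2 i then c.2.1 + 1 else c.2.1,
         if f3 i then c.2.2 + 1 else c.2.2)) c
    = (c.1 + ((List.range n).countP (fun k : Nat => decide (f1 (k : Int))) : Int),
       c.2.1 + ((List.range n).countP (fun k : Nat => decide (f2 (k : Int))) : Int),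
       c.2.2 + ((List.range n).countP (fun k : Nat => decide (f3 (k : Int))) : Int)) := by
  induction n generalizing c with
  | zero => simp
  | succ n ih =>
      have hcast : ((n + 1 : Nat) : Int) = (n : Int) + 1 := by omega
      rw [hcast, PySem.List.pyRange_one_succ_right (by positivity), List.foldl_append,
        ih, List.range_succ, List.countP_append, List.countP_append, List.countP_append]
      simp only [List.foldl_cons, List.foldl_nil, List.countP_cons, List.countP_nil]
      by_cases h1 : f1 (n : Int) <;> by_cases h2 : f2 (n : Int) <;> by_cases h3 : f3 (n : Int) <;>
        simp [h1, h2, h3] <;> omega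

-- B's enumerate pass counts the same countP over List.range
theorem enum_countP (q : Int → Int → Prop) [inst : ∀ i a, Decidable (q i a)]
    (xs : List Int) (k : Nat) :
    (PySem.List.enumerate xs (k : Int)).countP (fun p => decide (q p.1 p.2))
    = (List.range xs.length).countP (fun j : Nat => decide (q ((k + j : Nat) : Int) (xs.getD j 0))) := by
  induction xs generalizing k with
  | nil => simp [PySem.List.enumerate]
  | cons x t ih =>
      rw [PySem.List.enumerate, List.countP_cons]
      have hcast : (k : Int) + 1 = ((k + 1 : Nat) : Int) := by omega
      rw [hcast, ih, List.length_cons, List.range_succ_eq_map, List.countP_cons, List.countP_map]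
      have hfun : ((fun j : Nat => decide (q ((k + j : Nat) : Int) ((x :: t).getD j 0))) ∘ Nat.succ)
          = fun j : Nat => decide (q ((k + 1 + j : Nat) : Int) (t.getD j 0)) := by
        funext j
        have h : k + (j + 1) = k + 1 + j := by omega
        simp [Function.comp, Nat.succ_eq_add_one, h]
      rw [hfun]
      simp

-- on indices below the table size, A's table lookup equals the cyclic Nat-mod lookup
theorem count_eq (answers pat : List Int) (mrep : Nat)
    (hlen : answers.length ≤ mrep * pat.length) :
    (List.range answers.length).countP (fun k : Nat =>
      decide (PySem.List.pyGetD answers (k : Int) 0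
        = PySem.List.pyGetD ((List.replicate mrep pat).flatten) (k : Int) 0))
    = (List.range answers.length).countP (fun j : Nat =>
      decide (answers.getD j 0 = pat.getD (j % pat.length) 0)) := by
  apply List.countP_congr
  intro j hj
  rw [List.mem_range] at hj
  have hjlt : j < mrep * pat.length := by omega
  rw [PySem.List.pyGetD_natCast, PySem.List.pyGetD_natCast, cyc_getD pat mrep j 0 hjlt]

-- a sum of point-indicators over a Nodup index list is one membership test
theorem sum_indicator (rs : List Int) (hnd : rs.Nodup) (f : Int → Int) (k : Int × Int) :
    (rs.map (fun r => if k = (r, f r) then (1 : Int) else 0)).sum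
    = if k.1 ∈ rs ∧ k.2 = f k.1 then 1 else 0 := by
  induction rs with
  | nil => simp
  | cons r rs' ih =>
      obtain ⟨hr, hnd'⟩ := List.nodup_cons.mp hnd
      rw [List.map_cons, List.sum_cons, ih hnd']
      by_cases hk : k = (r, f r)
      · subst hk
        simp [hr]
      · have hiff : (k.1 ∈ r :: rs' ∧ k.2 = f k.1) ↔ (k.1 ∈ rs' ∧ k.2 = f k.1) := by
          constructor
          · rintro ⟨hm, he⟩
            rcases List.mem_cons.mp hm with h | h
            · exact absurd (Prod.ext h (by rw [he, h])) hk
            · exact ⟨h, he⟩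
          · rintro ⟨hm, he⟩; exact ⟨List.mem_cons_of_mem _ hm, he⟩
        simp only [hk, if_false, hiff, zero_add]

-- summing counts of (r, f r) over Nodup rs = one countP over the key list
theorem sum_count (rs : List Int) (hnd : rs.Nodup) (f : Int → Int) (ks : List (Int × Int)) :
    (rs.map (fun r => ((ks.count (r, f r) : Int)))).sum
    = ((ks.countP (fun k => decide (k.1 ∈ rs ∧ k.2 = f k.1))) : Int) := by
  induction ks with
  | nil => simp
  | cons k t ih =>
      have hsplit : (rs.map (fun r => (((k :: t).count (r, f r) : Int)))).sum
          = (rs.map (fun r => ((t.count (r, f r) : Int)))).sum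
            + (rs.map (fun r => if k = (r, f r) then (1 : Int) else 0)).sum := by
        rw [← List.sum_map_add]
        apply congrArg
        apply List.map_congr_left
        intro r _
        rw [List.count_cons]
        by_cases h : k = (r, f r) <;> simp [h]
      rw [hsplit, ih, sum_indicator rs hnd f k, List.countP_cons]
      by_cases h : k.1 ∈ rs ∧ k.2 = f k.1 <;> simp [h]

-- B's histogram score for one pattern is the match count over List.range
theorem bscore (answers pat : List Int) (hd : pat.length ∣ 40) :
    ((PySem.List.pyRange 0 40 1).map (fun r =>
      ((PySem.List.enumerate answers).foldl
        (fun (d : PySem.Dict (Int × Int) Int) p =>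
          d.insert (PySem.Int.mod p.1 40, p.2) (d.getD (PySem.Int.mod p.1 40, p.2) 0 + 1))
        PySem.Dict.empty).getD (r, PySem.List.pyGetD pat (PySem.Int.mod r (pat.length : Int)) 0) 0)).sum
    = ((List.range answers.length).countP (fun j : Nat =>
        decide (answers.getD j 0 = pat.getD (j % pat.length) 0)) : Int) := by
  have hL : 0 < pat.length := by
    rcases Nat.eq_zero_or_pos pat.length with h | h
    · rw [h] at hd; omega
    · exact h
  set f : Int → Int := fun r => PySem.List.pyGetD pat (PySem.Int.mod r (pat.length : Int)) 0 with hf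
  set ks : List (Int × Int) :=
    (PySem.List.enumerate answers).map (fun p => (PySem.Int.mod p.1 40, p.2)) with hks
  have hfold : (PySem.List.enumerate answers).foldl
      (fun (d : PySem.Dict (Int × Int) Int) p =>
        d.insert (PySem.Int.mod p.1 40, p.2) (d.getD (PySem.Int.mod p.1 40, p.2) 0 + 1))
      PySem.Dict.empty
    = ks.foldl (fun d x => d.insert x (d.getD x 0 + 1)) PySem.Dict.empty := by
    rw [hks, List.foldl_map]
  rw [hfold]
  have hget : ∀ r : Int,
      ((ks.foldl (fun (d : PySem.Dict (Int × Int) Int) x => d.insert x (d.getD x 0 + 1))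
        PySem.Dict.empty).getD (r, f r) 0) = (ks.count (r, f r) : Int) := by
    intro r
    rw [PySem.Dict.getD_foldl_insert_add_one, PySem.Dict.getD_empty, zero_add]
  have hmap : (PySem.List.pyRange 0 40 1).map (fun r =>
      ((ks.foldl (fun (d : PySem.Dict (Int × Int) Int) x => d.insert x (d.getD x 0 + 1))
        PySem.Dict.empty).getD (r, f r) 0))
      = (PySem.List.pyRange 0 40 1).map (fun r => (ks.count (r, f r) : Int)) :=
    List.map_congr_left (fun r _ => hget r)
  rw [hmap, sum_count _ (PySem.List.nodup_pyRange_one 0 40) f ks]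
  apply congrArg
  rw [hks, List.countP_map]
  have hcp : (PySem.List.enumerate answers).countP
      ((fun k : Int × Int => decide (k.1 ∈ PySem.List.pyRange 0 40 1 ∧ k.2 = f k.1)) ∘
        (fun p : Int × Int => (PySem.Int.mod p.1 40, p.2)))
      = (PySem.List.enumerate answers).countP
        (fun p : Int × Int => decide (p.2 = f (PySem.Int.mod p.1 40))) := by
    apply List.countP_congr
    intro p _
    have hmem : PySem.Int.mod p.1 40 ∈ PySem.List.pyRange 0 40 1 :=
      PySem.List.mem_pyRange_one.mpr
        ⟨PySem.Int.mod_nonneg _ (by norm_num), PySem.Int.mod_lt _ (by norm_num)⟩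
    simp only [Function.comp_apply, decide_eq_true_eq]
    exact ⟨fun h => h.2, fun h => ⟨hmem, h⟩⟩
  rw [hcp]
  have h0 : PySem.List.enumerate answers = PySem.List.enumerate answers ((0 : Nat) : Int) := by
    norm_num
  rw [h0, enum_countP (fun i a => a = f (PySem.Int.mod i 40))]
  apply List.countP_congr
  intro j hj
  have h40 : ((40 : Nat) : Int) = (40 : Int) := by norm_num
  have hmod : PySem.Int.mod ((0 + j : Nat) : Int) 40 = ((j % 40 : Nat) : Int) := by
    rw [← h40, PySem.Int.mod_natCast]
    norm_num
  have hmod2 : f (((j % 40 : Nat) : Int)) = pat.getD (j % pat.length) 0 := by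
    rw [hf]
    simp only []
    rw [PySem.Int.mod_natCast, PySem.List.pyGetD_natCast, Nat.mod_mod_of_dvd j hd]
  simp only [hmod, hmod2]

-- the final selection step, common to both programs, as a function of the three scores
theorem select_eq (s1 s2 s3 : Int) :
    (let m : Int := (PySem.List.max? [s1, s2, s3] (fun x => x)).getD 0
     let answer : List Int := []
     let answer := if m = s1 then answer ++ [1] else answer
     let answer := if m = s2 then answer ++ [2] else answer
     let answer := if m = s3 then answer ++ [3] else answer
     answer)
    = (let m : Int := (PySem.List.max? [s1, s2, s3] (fun x => x)).getD 0
       (PySem.List.enumerate [s1, s2, s3]).filterMap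
         (fun p => if p.2 = m then some (p.1 + 1) else none)) := by
  have he : PySem.List.enumerate ([s1, s2, s3] : List Int) = [(0, s1), (1, s2), (2, s3)] := by
    norm_num [PySem.List.enumerate]
  simp only [he, List.filterMap_cons, List.filterMap_nil]
  generalize (PySem.List.max? [s1, s2, s3] (fun x => x)).getD 0 = m
  rcases eq_or_ne m s1 with h1 | h1 <;>
    rcases eq_or_ne m s2 with h2 | h2 <;>
      rcases eq_or_ne m s3 with h3 | h3 <;>
        (simp_all; try simp_all [eq_comm])

-- ===== VERDICT (by name: the statement is the Claim_ definition above) =====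
theorem solution_spec : Claim_equal_solution := by
  intro answers _ hpre
  unfold Pre_solution at hpre
  unfold Spec_solution solution solution_alt
  simp only []
  rw [triple_foldl
    (fun i => PySem.List.pyGetD answers i 0 = PySem.List.pyGetD ((List.replicate 2000 ([1, 2, 3, 4, 5] : List Int)).flatten) i 0)
    (fun i => PySem.List.pyGetD answers i 0 = PySem.List.pyGetD ((List.replicate 1250 ([2, 1, 2, 3, 2, 4, 2, 5] : List Int)).flatten) i 0)
    (fun i => PySem.List.pyGetD answers i 0 = PySem.List.pyGetD ((List.replicate 1000 ([3, 3, 1, 1, 2, 2, 4, 4, 5, 5] : List Int)).flatten) i 0)]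
  simp only [List.map_cons, List.map_nil, zero_add]
  simp only [bscore answers [1, 2, 3, 4, 5] (by norm_num),
    bscore answers [2, 1, 2, 3, 2, 4, 2, 5] (by norm_num),
    bscore answers [3, 3, 1, 1, 2, 2, 4, 4, 5, 5] (by norm_num)]
  simp only [count_eq answers [1, 2, 3, 4, 5] 2000 (by simpa using hpre),
    count_eq answers [2, 1, 2, 3, 2, 4, 2, 5] 1250 (by simpa using hpre),
    count_eq answers [3, 3, 1, 1, 2, 2, 4, 4, 5, 5] 1000 (by simpa using hpre)]
  exact select_eq _ _ _
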